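-- pv_equiv track=rewrite | github.com/PigeonLabs/Every_day_BOJ | Python/백준/Gold/2042. 구간 합 구하기/구간 합 구하기.py | prefixlst
-- ===== SOURCE A (Python) =====
-- def prefixlst(lst):
--     result = [lst]
--     while len(lst) > 1:
--         new_lst = [lst[i] + lst[i+1] for i in range(0, len(lst) - 1, 2)]
--         if len(lst) % 2 == 1:
--             new_lst.append(lst[-1])
--         result.append(new_lst)
--         lst = new_lst
--     return result
-- ===== SOURCE B (Python) =====
-- def prefixlst(lst):
--     if len(lst) <= 1:
--         return [lst]
--     return [lst] + prefixlst(_pairs(lst))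
--
--
-- def _pairs(lst):
--     out = []
--     it = iter(lst)
--     for x in it:
--         y = next(it, None)
--         out.append(x if y is None else x + y)
--     return out
-- ===== Notes on version B (the rewrite author's own statement) =====
-- stated objective: simpler
-- what changed: The while loop with an explicit accumulator is replaced by direct recursion on the levels, and the index-range pair-sum comprehension with its odd-length special case is replaced by a single iterator pass that consumes two elements per step (no index arithmetic, no parity branch).
import Mathlib
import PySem

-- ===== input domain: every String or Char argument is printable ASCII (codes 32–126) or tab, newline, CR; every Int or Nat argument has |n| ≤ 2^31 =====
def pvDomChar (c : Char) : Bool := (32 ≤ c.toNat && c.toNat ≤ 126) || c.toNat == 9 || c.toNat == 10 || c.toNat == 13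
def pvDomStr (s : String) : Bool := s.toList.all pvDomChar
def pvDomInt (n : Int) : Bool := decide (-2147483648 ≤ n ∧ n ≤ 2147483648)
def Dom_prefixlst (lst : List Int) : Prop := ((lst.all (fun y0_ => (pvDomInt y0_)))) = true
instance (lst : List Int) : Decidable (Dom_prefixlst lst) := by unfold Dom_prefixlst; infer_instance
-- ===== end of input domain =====

-- B replaces A's while loop + accumulator and its index-range pair-sum comprehension by
-- structural recursion (a helper consuming the list two elements at a time); objective: simpler.

-- ===== PORT A =====
-- one iteration of A's while-loop body: the comprehension over range(0, len(lst)-1, 2)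
-- plus the odd-length append of lst[-1]
def pvNextA (lst : List Int) : List Int :=
  let n : Int := lst.length
  let newLst := (PySem.List.pyRange 0 (n - 1) 2).map
    (fun i => PySem.List.pyGetD lst i 0 + PySem.List.pyGetD lst (i + 1) 0)
  if PySem.Int.mod n 2 = 1 then newLst ++ [PySem.List.pyGetD lst (-1) 0] else newLst

-- termination of A's while loop: each level is strictly shorter
theorem pvNextA_length_lt (lst : List Int) (h : 1 < lst.length) :
    (pvNextA lst).length < lst.length := by
  simp only [pvNextA, PySem.List.pyRange_of_pos _ _ (by norm_num : (0:Int) < 2)]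
  split_ifs with hm <;> simp only [PySem.Int.mod, Int.fmod_eq_emod] at hm <;>
    norm_num at hm <;> simp <;> omega

-- A's while loop, tail-recursively, with the accumulator `result`
def prefixlstLoop (lst : List Int) (result : List (List Int)) : List (List Int) :=
  if 1 < lst.length then
    let newLst := pvNextA lst
    prefixlstLoop newLst (result ++ [newLst])
  else result
termination_by lst.length
decreasing_by exact pvNextA_length_lt lst (by omega)

def prefixlst (lst : List Int) : List (List Int) :=
  prefixlstLoop lst [lst]

-- ===== PORT B =====
-- Source B's _pairs: one pass over an iterator, consuming two elements per step (one at the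
-- odd tail); transcribed as structural recursion two elements at a time
def pvPairs (lst : List Int) : List Int :=
  match lst with
  | x :: y :: rest => (x + y) :: pvPairs rest
  | [x] => [x]
  | [] => []

-- termination of B's recursion: pairing halves the length (rounded up)
theorem pvPairs_length (lst : List Int) : (pvPairs lst).length = (lst.length + 1) / 2 := by
  induction lst using pvPairs.induct with
  | case1 a b rest ih => simp [pvPairs, ih]; omega
  | case2 x => simp [pvPairs]
  | case3 => rfl

def prefixlst_alt (lst : List Int) : List (List Int) :=
  if lst.length ≤ 1 then [lst]
  else lst :: prefixlst_alt (pvPairs lst)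
termination_by lst.length
decreasing_by simp [pvPairs_length]; omega

-- ===== PRECONDITION & SPEC =====
def Spec_prefixlst (lst : List Int) (out : List (List Int)) : Prop := out = prefixlst_alt lst
instance (lst : List Int) (out : List (List Int)) : Decidable (Spec_prefixlst lst out) := by unfold Spec_prefixlst; infer_instance

-- ===== CLAIM (what is proved, stated in full; the proofs are below) =====
def Claim_equal_prefixlst : Prop := ∀ (lst : List Int), Dom_prefixlst lst → Spec_prefixlst lst (prefixlst lst)

-- ===== LEMMAS AND PROOFS =====

theorem pvGetD_cons2 (a b : Int) (rest : List Int) (k : Nat) :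
    PySem.List.pyGetD (a :: b :: rest) ((k : Int) + 2) 0 = PySem.List.pyGetD rest (k : Int) 0 := by
  have h : ((k : Int) + 2) = ((k + 2 : Nat) : Int) := by push_cast; ring
  rw [h, PySem.List.pyGetD_natCast, PySem.List.pyGetD_natCast]
  rfl

theorem pvGetD_one (a b : Int) (rest : List Int) :
    PySem.List.pyGetD (a :: b :: rest) 1 0 = b := by
  rw [show (1:Int) = ((1:Nat):Int) by norm_num, PySem.List.pyGetD_natCast]
  rfl

-- A's loop body computes exactly B's pair sums, one cons step at a time
theorem pvNextA_cons (a b : Int) (rest : List Int) :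
    pvNextA (a :: b :: rest) = (a + b) :: pvNextA rest := by
  simp only [pvNextA, List.length_cons]
  rw [PySem.List.pyRange_of_pos _ _ (by norm_num : (0:Int) < 2),
      PySem.List.pyRange_of_pos _ _ (by norm_num : (0:Int) < 2)]
  have hc1 : (if (0:Int) < ↑(rest.length + 1 + 1) - 1 then (((rest.length + 1 + 1 : Nat) : Int) - 1 - 0 + 2 - 1) / 2 |>.toNat else 0) = rest.length / 2 + 1 := by
    rw [if_pos (by push_cast; omega)]; omega
  have hc2 : (if (0:Int) < ↑rest.length - 1 then (((rest.length : Nat) : Int) - 1 - 0 + 2 - 1) / 2 |>.toNat else 0) = rest.length / 2 := by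
    split <;> omega
  have hmap : ∀ k : Nat,
      PySem.List.pyGetD (a :: b :: rest) (0 + 2 * ((k + 1 : Nat) : Int)) 0
        + PySem.List.pyGetD (a :: b :: rest) (0 + 2 * ((k + 1 : Nat) : Int) + 1) 0
      = PySem.List.pyGetD rest (0 + 2 * (k : Int)) 0 + PySem.List.pyGetD rest (0 + 2 * (k : Int) + 1) 0 := by
    intro k
    rw [show (0 + 2 * ((k + 1 : Nat) : Int)) = ((2 * k : Nat) : Int) + 2 by push_cast; ring,
        show ((2 * k : Nat) : Int) + 2 + 1 = ((2 * k + 1 : Nat) : Int) + 2 by push_cast; ring,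
        pvGetD_cons2, pvGetD_cons2]
    norm_num
  have hmapeq :
      List.map (fun i => PySem.List.pyGetD (a :: b :: rest) i 0 + PySem.List.pyGetD (a :: b :: rest) (i + 1) 0)
          (List.map (fun k : Nat => (0 : Int) + 2 * ↑k) (List.range (rest.length / 2 + 1)))
      = (a + b) :: List.map (fun i => PySem.List.pyGetD rest i 0 + PySem.List.pyGetD rest (i + 1) 0)
          (List.map (fun k : Nat => (0 : Int) + 2 * ↑k) (List.range (rest.length / 2))) := by
    rw [List.map_map, List.map_map, List.range_succ_eq_map, List.map_cons, List.map_map]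
    congr 1
    · show PySem.List.pyGetD (a :: b :: rest) (0 + 2 * ((0:Nat):Int)) 0 + PySem.List.pyGetD (a :: b :: rest) (0 + 2 * ((0:Nat):Int) + 1) 0 = a + b
      norm_num [pvGetD_one]
    · refine List.map_congr_left fun k _ => ?_
      show PySem.List.pyGetD _ (0 + 2 * ((k + 1 : Nat) : Int)) 0 + PySem.List.pyGetD _ (0 + 2 * ((k + 1 : Nat) : Int) + 1) 0 = _
      exact hmap k
  have hmod : PySem.Int.mod ((rest.length + 1 + 1 : Nat) : Int) 2 = PySem.Int.mod ((rest.length : Nat) : Int) 2 := by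
    simp [PySem.Int.mod, Int.fmod_eq_emod]; omega
  rw [hc1, hc2, hmod]
  split
  · rename_i hodd
    have hne : rest ≠ [] := by
      rintro rfl; simp [PySem.Int.mod, Int.fmod_eq_emod] at hodd
    rw [PySem.List.pyGetD_neg_one _ _ (by simp : (a :: b :: rest) ≠ []),
        PySem.List.pyGetD_neg_one _ _ hne,
        List.getLast_cons (by simp : (b :: rest) ≠ []), List.getLast_cons hne]
    rw [hmapeq]
    simp
  · rw [hmapeq]

theorem pvNextA_eq_pvPairs (lst : List Int) : pvNextA lst = pvPairs lst := by
  induction lst using pvPairs.induct with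
  | case1 a b rest ih => rw [pvNextA_cons, ih]; rfl
  | case2 x =>
    show pvNextA [x] = [x]
    simp [pvNextA, PySem.List.pyRange_of_pos _ _ (by norm_num : (0:Int) < 2),
      PySem.Int.mod, Int.fmod_eq_emod, PySem.List.pyGetD_neg_one _ _ (by simp : ([x] : List Int) ≠ [])]
  | case3 => decide

-- B's result always starts with the input list itself
theorem prefixlst_alt_cons (lst : List Int) :
    prefixlst_alt lst = lst :: (prefixlst_alt lst).tail := by
  rw [prefixlst_alt]; split <;> simp

-- the loop invariant: A's loop extends the accumulator by B's remaining levels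
theorem prefixlstLoop_eq (n : Nat) (lst : List Int) (acc : List (List Int))
    (hn : lst.length ≤ n) :
    prefixlstLoop lst acc = acc ++ (prefixlst_alt lst).tail := by
  induction n generalizing lst acc with
  | zero =>
    rw [prefixlstLoop, prefixlst_alt, if_neg (by omega), if_pos (by omega)]
    simp
  | succ n ih =>
    rw [prefixlstLoop, prefixlst_alt]
    by_cases h : 1 < lst.length
    · have hlt := pvNextA_length_lt lst h
      rw [if_pos h, if_neg (by omega), ih _ _ (by omega), pvNextA_eq_pvPairs,
        List.tail_cons, List.append_assoc]
      congr 1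
      exact (prefixlst_alt_cons (pvPairs lst)).symm
    · rw [if_neg h, if_pos (by omega)]
      simp

-- ===== VERDICT (by name: the statement is the Claim_ definition above) =====
theorem prefixlst_spec : Claim_equal_prefixlst := by
  intro lst _
  unfold Spec_prefixlst prefixlst
  rw [prefixlstLoop_eq lst.length lst [lst] le_rfl]
  exact (prefixlst_alt_cons lst).symm
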